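-- pv_equiv track=rewrite | github.com/derek-betz/CrashDataRefiner | crash_data_refiner/pdf_report.py | _score_field
-- ===== SOURCE A (Python) =====
-- from typing import Any, Mapping, Sequence
--
-- FIELD_SCORE_RULES: Sequence[tuple[int, Sequence[str]]] = (
--     (90, ("severity", "injur", "fatal", "serious", "minor")),
--     (85, ("collision", "manner", "crash_type", "primary_factor", "contributing_factor")),
--     (80, ("weather", "surface", "light", "roadway", "road", "street", "route", "intersection", "cross_street")),
--     (70, ("city", "county", "state", "location", "address")),
--     (60, ("vehicle", "driver", "unit", "speed", "occupant")),
--     (50, ("property_damage", "damage", "deer", "animal", "median")),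
--     (40, ("work_zone", "school_zone", "construction", "workzone")),
--     (30, ("report", "case", "event", "number")),
--     (20, ("id",)),
-- )
--
-- def _score_field(key: str, text: str) -> int:
--     score = 0
--     for weight, tokens in FIELD_SCORE_RULES:
--         if any(token in key for token in tokens):
--             score += weight
--             break
--     if key.endswith("_id"):
--         score -= 25
--     if len(text) <= 12:
--         score += 6
--     elif len(text) <= 24:
--         score += 3
--     return score
-- ===== SOURCE B (Python) =====
-- FIELD_SCORE_RULES = (
--     (90, ("severity", "injur", "fatal", "serious", "minor")),
--     (85, ("collision", "manner", "crash_type", "primary_factor", "contributing_factor")),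
--     (80, ("weather", "surface", "light", "roadway", "road", "street", "route", "intersection", "cross_street")),
--     (70, ("city", "county", "state", "location", "address")),
--     (60, ("vehicle", "driver", "unit", "speed", "occupant")),
--     (50, ("property_damage", "damage", "deer", "animal", "median")),
--     (40, ("work_zone", "school_zone", "construction", "workzone")),
--     (30, ("report", "case", "event", "number")),
--     (20, ("id",)),
-- )
--
-- # Flattened token -> weight table, built once at module load.
-- TOKEN_WEIGHTS = {token: weight for weight, tokens in FIELD_SCORE_RULES for token in tokens}
--
--
-- def _score_field(key: str, text: str) -> int:
--     # Weights are descending across rules, so the max matching weight equals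
--     # the first-matching-rule weight of the priority loop.
--     score = max((w for t, w in TOKEN_WEIGHTS.items() if t in key), default=0)
--     if key.endswith("_id"):
--         score -= 25
--     if len(text) <= 12:
--         score += 6
--     elif len(text) <= 24:
--         score += 3
--     return score
-- ===== Notes on version B (the rewrite author's own statement) =====
-- stated objective: simpler
-- what changed: Replaces the priority-ordered rule loop with early break by a single max-reduction over a flattened token->weight dict built once at module load; valid because rule weights are strictly descending.
import Mathlib
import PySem

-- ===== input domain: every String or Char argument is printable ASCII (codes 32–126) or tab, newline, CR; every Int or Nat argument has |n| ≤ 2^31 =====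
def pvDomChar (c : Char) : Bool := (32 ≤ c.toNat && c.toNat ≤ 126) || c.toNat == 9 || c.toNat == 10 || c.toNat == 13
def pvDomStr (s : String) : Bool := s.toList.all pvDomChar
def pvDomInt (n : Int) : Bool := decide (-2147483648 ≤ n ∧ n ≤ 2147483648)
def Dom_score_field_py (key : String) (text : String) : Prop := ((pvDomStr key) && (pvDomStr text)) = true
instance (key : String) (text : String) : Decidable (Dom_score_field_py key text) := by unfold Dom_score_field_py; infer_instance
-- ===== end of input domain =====

-- B replaces A's priority-ordered loop with early break by a max-reduction over a
-- flattened token->weight table (weights are descending, so the results coincide): simpler.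

-- shared module constant FIELD_SCORE_RULES
def pvRules : List (Int × List String) :=
  [ (90, ["severity", "injur", "fatal", "serious", "minor"]),
    (85, ["collision", "manner", "crash_type", "primary_factor", "contributing_factor"]),
    (80, ["weather", "surface", "light", "roadway", "road", "street", "route", "intersection", "cross_street"]),
    (70, ["city", "county", "state", "location", "address"]),
    (60, ["vehicle", "driver", "unit", "speed", "occupant"]),
    (50, ["property_damage", "damage", "deer", "animal", "median"]),
    (40, ["work_zone", "school_zone", "construction", "workzone"]),
    (30, ["report", "case", "event", "number"]),
    (20, ["id"]) ]

-- ===== PORT A =====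
-- A's loop: first rule any of whose tokens occurs in key; break
def pvFirstRule (key : String) : List (Int × List String) → Int
  | [] => 0
  | (w, ts) :: rest => if ts.any (fun t => PySem.Str.isIn t key) then w else pvFirstRule key rest

def score_field_py (key : String) (text : String) : Int :=
  let score := pvFirstRule key pvRules
  let score := if PySem.Str.endswith key "_id" then score - 25 else score
  if (PySem.Str.len text : Int) ≤ 12 then score + 6
  else if (PySem.Str.len text : Int) ≤ 24 then score + 3
  else score

-- ===== PORT B =====
-- TOKEN_WEIGHTS: flattened token -> weight association list (dict comprehension)
def pvTokenWeights : List (String × Int) :=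
  pvRules.flatMap (fun r => r.2.map (fun t => (t, r.1)))

-- max(generator, default=0) over the matching weights (all weights positive)
def score_field_py_alt (key : String) (text : String) : Int :=
  let score := (pvTokenWeights.filterMap
      (fun tw => if PySem.Str.isIn tw.1 key then some tw.2 else none)).foldl max 0
  let score := if PySem.Str.endswith key "_id" then score - 25 else score
  if (PySem.Str.len text : Int) ≤ 12 then score + 6
  else if (PySem.Str.len text : Int) ≤ 24 then score + 3
  else score

-- ===== PRECONDITION & SPEC =====
def Spec_score_field_py (key : String) (text : String) (out : Int) : Prop := out = score_field_py_alt key text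
instance (key : String) (text : String) (out : Int) : Decidable (Spec_score_field_py key text out) := by unfold Spec_score_field_py; infer_instance

-- ===== CLAIM (what is proved, stated in full; the proofs are below) =====
def Claim_equal_score_field_py : Prop := ∀ (key : String) (text : String), Dom_score_field_py key text → Spec_score_field_py key text (score_field_py key text)

-- ===== LEMMAS AND PROOFS =====

def pvMaxMatch (key : String) (l : List (String × Int)) : Int :=
  (l.filterMap (fun tw => if PySem.Str.isIn tw.1 key then some tw.2 else none)).foldl max 0

theorem pv_foldl_max_le {l : List Int} {a c : Int} (ha : a ≤ c) (h : ∀ x ∈ l, x ≤ c) :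
    l.foldl max a ≤ c := by
  induction l generalizing a with
  | nil => simpa using ha
  | cons x t ih =>
      exact ih (max_le ha (h x (by simp))) (fun y hy => h y (by simp [hy]))

theorem pvMaxMatch_le (key : String) (l : List (String × Int)) {c : Int} (hc : 0 ≤ c)
    (h : ∀ tw ∈ l, tw.2 ≤ c) : pvMaxMatch key l ≤ c := by
  apply pv_foldl_max_le hc
  intro x hx
  rcases List.mem_filterMap.mp hx with ⟨tw, htw, hmap⟩
  split at hmap
  · cases hmap; exact h tw htw
  · cases hmap

theorem pv_foldl_max_split (l : List Int) : ∀ m : Int, 0 ≤ m → l.foldl max m = max m (l.foldl max 0) := by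
  induction l with
  | nil => intro m hm; simp [max_eq_left hm]
  | cons x t ih =>
      intro m hm
      simp only [List.foldl_cons]
      rw [ih (max m x) (le_trans hm (le_max_left _ _)), ih (max 0 x) (le_max_left _ _),
        ← max_assoc, ← max_assoc]
      congr 1
      rw [max_eq_left hm]

theorem pvMaxMatch_append (key : String) (l₁ l₂ : List (String × Int)) :
    pvMaxMatch key (l₁ ++ l₂) =
      max ((l₁.filterMap (fun tw => if PySem.Str.isIn tw.1 key then some tw.2 else none)).foldl max 0)
          (pvMaxMatch key l₂) := by
  unfold pvMaxMatch
  rw [List.filterMap_append, List.foldl_append,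
    pv_foldl_max_split _ _ ((PySem.List.le_foldl_max _ 0).1)]

-- on one rule's flattened tokens the fold is w if any token matches, else 0
theorem pvMaxMatch_rule (key : String) (w : Int) (ts : List String) (hw : 0 ≤ w) :
    ((ts.map (fun t => (t, w))).filterMap
       (fun tw => if PySem.Str.isIn tw.1 key then some tw.2 else none)).foldl max 0 =
      (if ts.any (fun t => PySem.Str.isIn t key) then w else 0) := by
  induction ts with
  | nil => simp
  | cons t rest ih =>
      cases h : PySem.Str.isIn t key with
      | true =>
          simp only [List.map_cons, List.filterMap_cons, List.any_cons, h, Bool.true_or,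
            if_pos, List.foldl_cons]
          rw [max_eq_right hw]
          refine le_antisymm (pv_foldl_max_le le_rfl ?_) (PySem.List.le_foldl_max _ w).1
          intro x hx
          rcases List.mem_filterMap.mp hx with ⟨tw, htw, hmap⟩
          rcases List.mem_map.mp htw with ⟨t', _, rfl⟩
          split at hmap
          · cases hmap; exact le_rfl
          · cases hmap
      | false =>
          simp only [List.map_cons, List.filterMap_cons, List.any_cons, h, Bool.false_or,
            Bool.false_eq_true, if_false]
          exact ih

-- main: descending nonnegative weights make the first-match loop equal the flat max
theorem pvFirstRule_eq_maxMatch (key : String) (L : List (Int × List String))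
    (hpos : ∀ r ∈ L, 0 ≤ r.1)
    (hdesc : L.Pairwise (fun a b => b.1 ≤ a.1)) :
    pvFirstRule key L = pvMaxMatch key (L.flatMap (fun r => r.2.map (fun t => (t, r.1)))) := by
  induction L with
  | nil => simp [pvFirstRule, pvMaxMatch]
  | cons r rest ih =>
      obtain ⟨w, ts⟩ := r
      rw [List.flatMap_cons, pvMaxMatch_append, pvMaxMatch_rule key w ts (hpos (w, ts) (by simp))]
      have hrest := ih (fun x hx => hpos x (by simp [hx])) hdesc.tail
      cases h : ts.any (fun t => PySem.Str.isIn t key) with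
      | true =>
          simp only [pvFirstRule, h, if_pos]
          refine (max_eq_left ?_).symm
          apply pvMaxMatch_le key _ (hpos (w, ts) (by simp))
          intro tw htw
          rcases List.mem_flatMap.mp htw with ⟨r', hr', htw'⟩
          rcases List.mem_map.mp htw' with ⟨t', _, rfl⟩
          exact (List.pairwise_cons.mp hdesc).1 r' hr'
      | false =>
          simp only [pvFirstRule, h, Bool.false_eq_true, if_false]
          rw [hrest]
          exact (max_eq_right ((PySem.List.le_foldl_max _ 0).1)).symm

-- ===== VERDICT (by name: the statement is the Claim_ definition above) =====
theorem score_field_py_spec : Claim_equal_score_field_py := by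
  intro key text _
  unfold Spec_score_field_py score_field_py score_field_py_alt pvTokenWeights
  rw [pvFirstRule_eq_maxMatch key pvRules (by decide) (by decide)]
  rfl
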